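-- pv_equiv track=rewrite | github.com/mediatum/mediatum | workflow/addformpage.py | parse_pdftk_fields_dump
-- ===== SOURCE A (Python) =====
-- def parse_pdftk_fields_dump(s):
--     field_dicts = []
--     d = {}
--     for line in [line.strip() for line in s.splitlines() if line.strip()]:
--         if line.startswith('---'):
--             if d:
--                 field_dicts.append(d)
--                 d = {}
--         elif line.find(':') > 0:
--             vals = line.split(':')
--             d[vals[0].strip()] = ":".join(vals[1:]).strip()
--     field_dicts.append(d)
--     return field_dicts
-- ===== SOURCE B (Python) =====
-- def parse_pdftk_fields_dump(s):
--     lines = [line.strip() for line in s.splitlines() if line.strip()]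
--     done, cur = [], []
--     for line in lines:
--         if line.startswith('---'):
--             done.append(cur)
--             cur = []
--         else:
--             cur.append(line)
--
--     def block_to_dict(block):
--         d = {}
--         for line in block:
--             if line.find(':') > 0:
--                 vals = line.split(':')
--                 d[vals[0].strip()] = ':'.join(vals[1:]).strip()
--         return d
--
--     result = []
--     for b in done:
--         dd = block_to_dict(b)
--         if dd:
--             result.append(dd)
--     result.append(block_to_dict(cur))
--     return result
-- ===== Notes on version B (the rewrite author's own statement) =====
-- stated objective: alternative
-- what changed: A's single stateful loop (flush the running dict at each '---' separator) is replaced by a three-stage pipeline: partition the stripped non-empty lines into blocks at separators, convert each block to a dict with a helper, then emit every non-empty block dict plus the final block's dict unconditionally.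
import Mathlib
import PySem

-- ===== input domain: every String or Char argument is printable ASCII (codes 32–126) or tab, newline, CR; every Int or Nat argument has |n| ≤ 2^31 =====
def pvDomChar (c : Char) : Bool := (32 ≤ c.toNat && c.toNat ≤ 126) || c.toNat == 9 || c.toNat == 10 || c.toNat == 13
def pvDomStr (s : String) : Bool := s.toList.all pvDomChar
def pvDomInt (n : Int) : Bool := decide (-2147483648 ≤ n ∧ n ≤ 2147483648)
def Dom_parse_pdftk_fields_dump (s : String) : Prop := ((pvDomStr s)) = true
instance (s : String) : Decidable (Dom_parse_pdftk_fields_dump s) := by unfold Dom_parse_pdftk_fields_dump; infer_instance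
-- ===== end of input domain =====

-- B replaces A's single flush-on-separator loop by a three-stage decomposition (partition lines into blocks, turn each block into a dict, emit); alternative structure, same cost.


-- ===== PORT A =====
-- one loop over the stripped non-empty lines; '---' flushes the current dict only when non-empty; final dict appended unconditionally
def pvAStep (st : List (PySem.Dict String String) × PySem.Dict String String) (line : String) :
    List (PySem.Dict String String) × PySem.Dict String String :=
  if PySem.Str.startswith line "---" then
    if st.2.items.isEmpty then st else (st.1 ++ [st.2], PySem.Dict.empty)
  else if PySem.Str.find line ":" > 0 then
    let vals := (PySem.Str.split? line ":").getD []  -- sep is the non-empty literal ":", so split? is always some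
    (st.1, st.2.insert (PySem.Str.strip (PySem.List.pyGetD vals 0 ""))
                       (PySem.Str.strip (PySem.Str.join ":" (vals.drop 1))))
  else st

def parse_pdftk_fields_dump (s : String) : List (List (String × String)) :=
  let lines := ((PySem.Str.splitlines s).filter (fun l => PySem.Str.strip l != "")).map PySem.Str.strip
  let r := lines.foldl pvAStep ([], PySem.Dict.empty)
  (r.1 ++ [r.2]).map (fun d => d.items)

-- ===== PORT B =====
def pvLineKV (d : PySem.Dict String String) (line : String) : PySem.Dict String String :=
  if PySem.Str.find line ":" > 0 then
    let vals := (PySem.Str.split? line ":").getD []  -- sep is the non-empty literal ":", so split? is always some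
    d.insert (PySem.Str.strip (PySem.List.pyGetD vals 0 ""))
             (PySem.Str.strip (PySem.Str.join ":" (vals.drop 1)))
  else d

def pvBlockToDict (block : List String) : PySem.Dict String String :=
  block.foldl pvLineKV PySem.Dict.empty

def pvPartStep (st : List (List String) × List String) (line : String) :
    List (List String) × List String :=
  if PySem.Str.startswith line "---" then (st.1 ++ [st.2], []) else (st.1, st.2 ++ [line])

def pvEmitStep (acc : List (List (String × String))) (b : List String) : List (List (String × String)) :=
  if (pvBlockToDict b).items.isEmpty then acc else acc ++ [(pvBlockToDict b).items]

def parse_pdftk_fields_dump_alt (s : String) : List (List (String × String)) :=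
  let lines := ((PySem.Str.splitlines s).filter (fun l => PySem.Str.strip l != "")).map PySem.Str.strip
  let r := lines.foldl pvPartStep ([], [])
  r.1.foldl pvEmitStep [] ++ [(pvBlockToDict r.2).items]

-- ===== PRECONDITION & SPEC =====
def Spec_parse_pdftk_fields_dump (s : String) (out : List (List (String × String))) : Prop := out = parse_pdftk_fields_dump_alt s
instance (s : String) (out : List (List (String × String))) : Decidable (Spec_parse_pdftk_fields_dump s out) := by unfold Spec_parse_pdftk_fields_dump; infer_instance

-- ===== CLAIM (what is proved, stated in full; the proofs are below) =====
def Claim_equal_parse_pdftk_fields_dump : Prop := ∀ (s : String), Dom_parse_pdftk_fields_dump s → Spec_parse_pdftk_fields_dump s (parse_pdftk_fields_dump s)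

-- ===== LEMMAS AND PROOFS =====

-- common recursive characterisation: the dicts produced from `ls`, with `d` the dict of the current (open) block
def pvG : List String → PySem.Dict String String → List (PySem.Dict String String)
  | [], d => [d]
  | l :: ls, d =>
    if PySem.Str.startswith l "---" then
      if d.items.isEmpty then pvG ls d else d :: pvG ls PySem.Dict.empty
    else pvG ls (pvLineKV d l)

theorem pvDict_eq_empty_of_items_nil (d : PySem.Dict String String) (h : d.items = []) :
    d = PySem.Dict.empty := by
  apply PySem.Dict.ext
  simpa using h

theorem pvA_eq_G (ls : List String) : ∀ (fds : List (PySem.Dict String String))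
    (d : PySem.Dict String String),
    (ls.foldl pvAStep (fds, d)).1 ++ [(ls.foldl pvAStep (fds, d)).2] = fds ++ pvG ls d := by
  induction ls with
  | nil => intro fds d; simp [pvG]
  | cons l ls ih =>
    intro fds d
    simp only [List.foldl_cons, pvAStep, pvG]
    by_cases hs : PySem.Chars.startswith l.toList ['-', '-', '-'] = true
    · by_cases he : d.items = []
      · simp [hs, he, ih]
      · simp [hs, he, ih]
    · by_cases hc : 0 < PySem.Chars.find l.toList [':']
      · simp [hs, hc, ih, pvLineKV]
      · simp [hs, hc, ih, pvLineKV]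

theorem pvBlockToDict_nil : pvBlockToDict [] = PySem.Dict.empty := rfl

theorem pvEmpty_items : (PySem.Dict.empty : PySem.Dict String String).items = [] := rfl

theorem pvB_eq_G (ls : List String) : ∀ (done : List (List String)) (cur : List String)
    (acc : List (List (String × String))),
    ((ls.foldl pvPartStep (done, cur)).1.foldl pvEmitStep acc
      ++ [(pvBlockToDict (ls.foldl pvPartStep (done, cur)).2).items])
    = done.foldl pvEmitStep acc ++ (pvG ls (pvBlockToDict cur)).map (fun d => d.items) := by
  induction ls with
  | nil => intro done cur acc; simp [pvG]
  | cons l ls ih =>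
    intro done cur acc
    simp only [List.foldl_cons, pvPartStep, pvG]
    by_cases hs : PySem.Chars.startswith l.toList ['-', '-', '-'] = true
    · by_cases he : (pvBlockToDict cur).items = []
      · rw [pvDict_eq_empty_of_items_nil _ he]
        -- the carried-over empty dict IS the fresh empty dict
        simp [hs, he, ih, pvEmitStep, List.foldl_append, pvBlockToDict_nil, pvEmpty_items]
      · simp [hs, he, ih, pvEmitStep, List.foldl_append, pvBlockToDict_nil]
    · have hb : pvBlockToDict (cur ++ [l]) = pvLineKV (pvBlockToDict cur) l := by
        simp [pvBlockToDict, List.foldl_append]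
      simp [hs, ih, hb]

-- ===== VERDICT (by name: the statement is the Claim_ definition above) =====
theorem parse_pdftk_fields_dump_spec : Claim_equal_parse_pdftk_fields_dump := by
  intro s _
  show parse_pdftk_fields_dump s = parse_pdftk_fields_dump_alt s
  simp only [parse_pdftk_fields_dump, parse_pdftk_fields_dump_alt]
  rw [pvA_eq_G, pvB_eq_G]
  simp [pvBlockToDict]
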